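-- pv_equiv track=rewrite | github.com/ehsanshahkakarh/primer_project | 18S_subset/src/validate_primers_pr2.py | find_primer_binding
-- ===== SOURCE A (Python) =====
-- from typing import List, Tuple, Dict
--
-- def find_primer_binding_exact(seq: str, primer: str) -> List[int]:
--     """Find all exact match positions where primer binds (fast)."""
--     positions = []
--     primer_upper = primer.upper()
--     seq_upper = seq.upper()
--     start = 0
--     while True:
--         pos = seq_upper.find(primer_upper, start)
--         if pos == -1:
--             break
--         positions.append(pos)
--         start = pos + 1
--     return positions
--
-- def find_primer_binding(seq: str, primer: str, max_mismatches: int = 2) -> List[int]: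
--     """Find all positions where primer binds (with allowed mismatches)."""
--     # Fast path: try exact match first
--     if max_mismatches == 0:
--         return find_primer_binding_exact(seq, primer)
--
--     positions = []
--     primer_len = len(primer)
--     seq_upper = seq.upper()
--     primer_upper = primer.upper()
--
--     # Optimization: use first 8bp as anchor, then check full primer
--     anchor = primer_upper[:8]
--     start = 0
--     while True:
--         pos = seq_upper.find(anchor, start)
--         if pos == -1:
--             break
--         if pos + primer_len <= len(seq_upper):
--             region = seq_upper[pos:pos + primer_len]
--             mismatches = sum(1 for a, b in zip(region, primer_upper) if a != b and a != 'N' and b != 'N')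
--             if mismatches <= max_mismatches:
--                 positions.append(pos)
--         start = pos + 1
--
--     return positions
-- ===== SOURCE B (Python) =====
-- def find_primer_binding(seq, primer, max_mismatches=2):
--     """Find all positions where primer binds (with allowed mismatches)."""
--     seq_u = seq.upper()
--     prim_u = primer.upper()
--     n, m = len(seq_u), len(prim_u)
--     if max_mismatches == 0:
--         # k-mer index: group every m-length window of the sequence by its text,
--         # then a single dictionary lookup replaces any scanning for the primer
--         index = {}
--         for i in range(n - m + 1):
--             index.setdefault(seq_u[i:i + m], []).append(i)
--         return index.get(prim_u, [])
--     anchor = prim_u[:8]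
--     la = len(anchor)
--     # index all la-length windows once; the anchor hits are one lookup away
--     index = {}
--     for i in range(n - la + 1):
--         index.setdefault(seq_u[i:i + la], []).append(i)
--     positions = []
--     for i in index.get(anchor, []):
--         if i + m <= n:
--             mismatches = sum(1 for a, b in zip(seq_u[i:i + m], prim_u)
--                              if a != b and a != 'N' and b != 'N')
--             if mismatches <= max_mismatches:
--                 positions.append(i)
--     return positions
-- ===== Notes on version B (the rewrite author's own statement) =====
-- stated objective: alternative
-- what changed: A's two while-True/str.find anchor-jumping scans are replaced by a k-mer index: a dictionary grouping every fixed-length window of the uppercased sequence by its text is built in one pass, so the anchor (or, on the exact path, the whole primer) hits come from a single dictionary lookup instead of repeated substring searches; mismatch counting then runs only over the looked-up bucket.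
import Mathlib
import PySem

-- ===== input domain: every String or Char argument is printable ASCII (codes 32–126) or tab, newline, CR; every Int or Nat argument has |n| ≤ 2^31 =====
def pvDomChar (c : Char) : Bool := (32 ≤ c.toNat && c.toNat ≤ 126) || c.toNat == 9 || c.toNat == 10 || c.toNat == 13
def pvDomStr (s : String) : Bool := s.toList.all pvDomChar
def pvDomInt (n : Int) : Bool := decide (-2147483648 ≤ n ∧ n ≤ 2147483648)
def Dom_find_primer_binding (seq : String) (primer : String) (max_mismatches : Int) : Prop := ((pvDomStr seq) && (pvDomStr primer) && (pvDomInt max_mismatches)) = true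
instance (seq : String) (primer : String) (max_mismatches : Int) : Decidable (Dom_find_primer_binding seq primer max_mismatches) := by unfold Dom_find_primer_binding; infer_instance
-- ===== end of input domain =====

-- B replaces A's find()-driven anchor-jumping scans by a k-mer index: a dictionary grouping
-- every fixed-length window of the sequence by its text, built in one pass, so locating the
-- primer/anchor becomes a single lookup; same return value.

-- mismatch count shared by both ports: the Python line
-- 'sum(1 for a, b in zip(region, primer_upper) if a != b and a != "N" and b != "N")'
-- appears verbatim in A and in B.
def pvMismatch (region : List Char) (pU : List Char) : Int :=
  (((region.zip pU).filter
      (fun ab => ab.1 != ab.2 && ab.1 != 'N' && ab.2 != 'N')).map (fun _ => (1 : Int))).sum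

-- ===== PORT A =====
-- the 'while True: pos = seq_upper.find(needle, start) … start = pos + 1' loop of A, with
-- g pos = what A appends at a hit (helpers stay helpers; both of A's loops have this shape).
-- fuel only makes the recursion structural: len(seq)+1 iterations always suffice, since each
-- step moves start past the previous hit (proved exact in pvFindLoop_eq below).
def pvFindLoop (s a : List Char) (g : Int → List Int) : Nat → Nat → List Int
  | 0, _ => []
  | fuel + 1, start =>
    let pos := PySem.Chars.findFrom s a (start : Int) none
    if pos = -1 then []
    else g pos ++ pvFindLoop s a g fuel (pos.toNat + 1)

def find_primer_binding_exact (seq : String) (primer : String) : List Int :=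
  pvFindLoop (PySem.Chars.upper seq.toList) (PySem.Chars.upper primer.toList)
    (fun pos => [pos]) ((PySem.Chars.upper seq.toList).length + 1) 0

def find_primer_binding (seq : String) (primer : String) (max_mismatches : Int) : List Int :=
  if max_mismatches = 0 then find_primer_binding_exact seq primer
  else
    let sU := PySem.Chars.upper seq.toList
    let pU := PySem.Chars.upper primer.toList
    let anchor := PySem.List.slice pU none (some (8 : Int))
    pvFindLoop sU anchor
      (fun pos =>
        if pos + (pU.length : Int) ≤ (sU.length : Int) then
          if pvMismatch (PySem.List.slice sU (some pos) (some (pos + (pU.length : Int)))) pU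
              ≤ max_mismatches then [pos]
          else []
        else []) (sU.length + 1) 0

-- ===== PORT B =====
-- 'index = {}; for i in range(..): index.setdefault(window, []).append(i)' is the foldl with
-- Dict.modify key [] (· ++ [i]) (setdefault-then-append = modify with default []).
def find_primer_binding_alt (seq : String) (primer : String) (max_mismatches : Int) : List Int :=
  let sU := PySem.Chars.upper seq.toList
  let pU := PySem.Chars.upper primer.toList
  let n : Int := sU.length
  let m : Int := pU.length
  if max_mismatches = 0 then
    let index := (PySem.List.pyRange 0 (n - m + 1) 1).foldl
      (fun d i => d.modify (PySem.List.slice sU (some i) (some (i + m))) [] (· ++ [i]))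
      (PySem.Dict.empty : PySem.Dict (List Char) (List Int))
    index.getD pU []
  else
    let anchor := PySem.List.slice pU none (some (8 : Int))
    let la : Int := anchor.length
    let index := (PySem.List.pyRange 0 (n - la + 1) 1).foldl
      (fun d i => d.modify (PySem.List.slice sU (some i) (some (i + la))) [] (· ++ [i]))
      (PySem.Dict.empty : PySem.Dict (List Char) (List Int))
    (index.getD anchor []).foldl
      (fun positions i =>
        if i + m ≤ n then
          if pvMismatch (PySem.List.slice sU (some i) (some (i + m))) pU ≤ max_mismatches
          then positions ++ [i] else positions
        else positions) []

-- ===== PRECONDITION & SPEC =====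
def Spec_find_primer_binding (seq : String) (primer : String) (max_mismatches : Int) (out : List Int) : Prop := out = find_primer_binding_alt seq primer max_mismatches
instance (seq : String) (primer : String) (max_mismatches : Int) (out : List Int) : Decidable (Spec_find_primer_binding seq primer max_mismatches out) := by unfold Spec_find_primer_binding; infer_instance

-- ===== CLAIM (what is proved, stated in full; the proofs are below) =====
def Claim_equal_find_primer_binding : Prop := ∀ (seq : String) (primer : String) (max_mismatches : Int), Dom_find_primer_binding seq primer max_mismatches → Spec_find_primer_binding seq primer max_mismatches (find_primer_binding seq primer max_mismatches)

-- ===== LEMMAS AND PROOFS =====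

-- str.find with a start past len(s) returns -1 (CPython quirk kept by PySem)
lemma pvFindFrom_gt (s a : List Char) (k : Nat) (h : s.length < k) :
    PySem.Chars.findFrom s a (k : Int) none = -1 := by
  have h1 : ¬ ((k : Int) < 0) := by omega
  have h2 : ((s.length : Int)) < ((k : Int)) := by exact_mod_cast h
  unfold PySem.Chars.findFrom
  simp [h1, h2]

-- when find succeeds, the hit lies in [start, len]
lemma pvFind_pos_spec (s a : List Char) (k : Nat)
    (h : PySem.Chars.findFrom s a (k : Int) none ≠ -1) :
    k ≤ (PySem.Chars.findFrom s a (k : Int) none).toNat ∧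
      (PySem.Chars.findFrom s a (k : Int) none).toNat ≤ s.length := by
  by_cases hk : k ≤ s.length
  · rw [PySem.Chars.findFrom_natCast s a k hk] at h ⊢
    by_cases hr : PySem.Chars.find (s.drop k) a = -1
    · simp [hr] at h
    · have h0 : (0 : Int) ≤ PySem.Chars.find (s.drop k) a := by
        have := PySem.Chars.neg_one_le_find (s.drop k) a; omega
      have hle : PySem.Chars.find (s.drop k) a ≤ ((s.drop k).length : Int) :=
        PySem.Chars.find_le_length _ _
      rw [List.length_drop] at hle
      rw [if_neg hr]
      constructor <;> omega
  · exact absurd (pvFindFrom_gt s a k (by omega)) h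

-- a prefix at position i ≥ k is an infix of s.drop k
lemma pvPrefix_infix (s a : List Char) (k i : Nat) (hk : k ≤ i) (h : a <+: s.drop i) :
    a <:+: s.drop k := by
  have hd : s.drop i = (s.drop k).drop (i - k) := by
    rw [List.drop_drop]; congr 1; omega
  rw [hd] at h
  exact h.isInfix.trans (List.drop_suffix (i - k) (s.drop k)).isInfix

-- the find-driven loop collects exactly the positions in [start, len] where the needle is a prefix
lemma pvFindLoop_eq (s a : List Char) (g : Int → List Int) :
    ∀ (fuel start : Nat), s.length + 1 - start ≤ fuel →
      pvFindLoop s a g fuel start =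
        ((PySem.List.pyRange (start : Int) ((s.length : Int) + 1) 1).filter
          (fun i => decide (a <+: s.drop i.toNat))).flatMap g := by
  intro fuel
  induction fuel with
  | zero =>
    intro start hst
    rw [PySem.List.pyRange_one_eq_nil (by omega)]
    rfl
  | succ fuel ih =>
    intro start hst
    by_cases hpos : PySem.Chars.findFrom s a (start : Int) none = -1
    · have hL : pvFindLoop s a g (fuel + 1) start = [] := by simp [pvFindLoop, hpos]
      rw [hL]
      by_cases hk : start ≤ s.length
      · have hno : ¬ a <:+: s.drop start :=
          (PySem.Chars.findFrom_natCast_eq_neg_one_iff s a start hk).mp hpos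
        have hfil : (PySem.List.pyRange (start : Int) ((s.length : Int) + 1) 1).filter
            (fun i => decide (a <+: s.drop i.toNat)) = [] := by
          apply List.filter_eq_nil_iff.mpr
          intro i hi
          have hm := PySem.List.mem_pyRange_one.mp hi
          simp only [decide_eq_true_eq]
          intro hpre
          exact hno (pvPrefix_infix s a start i.toNat (by omega) hpre)
        rw [hfil]
        rfl
      · rw [PySem.List.pyRange_one_eq_nil (by omega)]
        rfl
    · obtain ⟨hb1, hb2⟩ := pvFind_pos_spec s a start hpos
      have hk : start ≤ s.length := le_trans hb1 hb2
      obtain ⟨h1, h2, h3⟩ := PySem.Chars.findFrom_natCast_spec s a start hk hpos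
      have hL : pvFindLoop s a g (fuel + 1) start =
          g (PySem.Chars.findFrom s a (start : Int) none) ++
            pvFindLoop s a g fuel ((PySem.Chars.findFrom s a (start : Int) none).toNat + 1) := by
        simp [pvFindLoop, hpos]
      rw [hL]
      set p := PySem.Chars.findFrom s a (start : Int) none with hp
      have hp0 : (0 : Int) ≤ p := le_trans (by positivity) h1
      have hpq : p = (p.toNat : Int) := (Int.toNat_of_nonneg hp0).symm
      rw [PySem.List.pyRange_one_append (start : Int) (p.toNat : Int) ((s.length : Int) + 1)
            (by exact_mod_cast hb1) (by omega)]
      rw [PySem.List.pyRange_one_cons (show (p.toNat : Int) < (s.length : Int) + 1 by omega)]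
      rw [List.filter_append]
      have hfirst : (PySem.List.pyRange (start : Int) (p.toNat : Int) 1).filter
          (fun i => decide (a <+: s.drop i.toNat)) = [] := by
        apply List.filter_eq_nil_iff.mpr
        intro i hi
        have hm := PySem.List.mem_pyRange_one.mp hi
        simp only [decide_eq_true_eq]
        intro hpre
        exact h3 i.toNat (by omega) (by omega) hpre
      rw [hfirst, List.nil_append]
      rw [List.filter_cons_of_pos (by simp only [Int.toNat_natCast, decide_eq_true_eq]; exact h2)]
      rw [List.flatMap_cons]
      have hrec := ih (p.toNat + 1) (by omega)
      rw [Nat.cast_add, Nat.cast_one] at hrec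
      rw [hrec]
      congr 1
      exact congrArg g hpq

lemma pvFlatMap_ite_filter (l : List Int) (p q : Int → Bool) :
    (l.filter p).flatMap (fun i => if q i then [i] else []) =
      l.filter (fun i => p i && q i) := by
  induction l with
  | nil => rfl
  | cons x xs ih =>
    by_cases hp : p x <;> by_cases hq : q x <;>
      simp [hp, hq, ih]

-- the slice s[i : i + len a] for 0 ≤ i is take (len a) of drop i
lemma pvSlice_take (s a : List Char) (i : Int) (h0 : 0 ≤ i) :
    PySem.List.slice s (some i) (some (i + (a.length : Int))) =
      (s.drop i.toNat).take a.length := by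
  rw [PySem.List.slice_toNat s h0 (by omega)]
  congr 1
  omega

-- slice-equality with the needle is exactly 'needle is a prefix of the drop'
lemma pvSliceEq_prefix (s a : List Char) (i : Int) (h0 : 0 ≤ i) :
    (PySem.List.slice s (some i) (some (i + (a.length : Int))) == a) =
      decide (a <+: s.drop i.toNat) := by
  rw [pvSlice_take s a i h0]
  by_cases hp : a <+: s.drop i.toNat
  · simp [hp, ((List.prefix_iff_eq_take).mp hp).symm]
  · simp only [hp, decide_false, beq_eq_false_iff_ne, ne_eq]
    intro he
    exact hp ((List.prefix_iff_eq_take).mpr he.symm)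

-- positions past len s - len a can never satisfy the slice test: the range may stop there
lemma pvFilter_shrink (s a : List Char) (q : Int → Bool) :
    (PySem.List.pyRange 0 ((s.length : Int) + 1) 1).filter
        (fun i => (PySem.List.slice s (some i) (some (i + (a.length : Int))) == a) && q i) =
      (PySem.List.pyRange 0 ((s.length : Int) - (a.length : Int) + 1) 1).filter
        (fun i => (PySem.List.slice s (some i) (some (i + (a.length : Int))) == a) && q i) := by
  have hc : ∀ i : Int, 0 ≤ i → i ≤ (s.length : Int) →
      (PySem.List.slice s (some i) (some (i + (a.length : Int))) == a) = true →
      (a.length : Int) ≤ (s.length : Int) - i := by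
    intro i h0 hile he
    rw [pvSlice_take s a i h0] at he
    have he' := beq_iff_eq.mp he
    have hlen : ((s.drop i.toNat).take a.length).length = a.length := by rw [he']
    rw [List.length_take, List.length_drop] at hlen
    omega
  by_cases hla : (a.length : Int) ≤ (s.length : Int)
  · rw [PySem.List.pyRange_one_append 0 ((s.length : Int) - (a.length : Int) + 1)
          ((s.length : Int) + 1) (by omega) (by omega), List.filter_append]
    have htail : (PySem.List.pyRange ((s.length : Int) - (a.length : Int) + 1)
        ((s.length : Int) + 1) 1).filter
        (fun i => (PySem.List.slice s (some i) (some (i + (a.length : Int))) == a) && q i) = [] := by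
      apply List.filter_eq_nil_iff.mpr
      intro i hi
      have hm := PySem.List.mem_pyRange_one.mp hi
      simp only [Bool.and_eq_true, not_and]
      intro he _
      have := hc i (by omega) (by omega) he
      omega
    rw [htail, List.append_nil]
  · have hnil : PySem.List.pyRange 0 ((s.length : Int) - (a.length : Int) + 1) 1 = [] :=
      PySem.List.pyRange_one_eq_nil (by omega)
    rw [hnil]
    apply List.filter_eq_nil_iff.mpr
    intro i hi
    have hm := PySem.List.mem_pyRange_one.mp hi
    simp only [Bool.and_eq_true, not_and]
    intro he _
    have := hc i (by omega) (by omega) he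
    omega

-- A's find loop (body: append i when q i) = the positional filter over all window starts
lemma pvLoop_filter (s a : List Char) (q : Int → Bool) :
    pvFindLoop s a (fun i => if q i then [i] else []) (s.length + 1) 0 =
      (PySem.List.pyRange 0 ((s.length : Int) - (a.length : Int) + 1) 1).filter
        (fun i => (PySem.List.slice s (some i) (some (i + (a.length : Int))) == a) && q i) := by
  have h := pvFindLoop_eq s a (fun i => if q i then [i] else []) (s.length + 1) 0 (by omega)
  norm_num at h
  rw [h, pvFlatMap_ite_filter]
  have hcg : (PySem.List.pyRange 0 ((s.length : Int) + 1) 1).filter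
        (fun i => decide (a <+: s.drop i.toNat) && q i) =
      (PySem.List.pyRange 0 ((s.length : Int) + 1) 1).filter
        (fun i => (PySem.List.slice s (some i) (some (i + (a.length : Int))) == a) && q i) := by
    apply List.filter_congr
    intro i hi
    have hm := PySem.List.mem_pyRange_one.mp hi
    rw [pvSliceEq_prefix s a i (by omega)]
  rw [hcg]
  exact pvFilter_shrink s a q

-- B's index build is a grouping loop: the bucket of key a is exactly the i's whose window is a
lemma pvIndex_getD (l : List Int) (key : Int → List Char) (a : List Char) :
    ((l.foldl (fun d i => d.modify (key i) [] (· ++ [i]))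
        (PySem.Dict.empty : PySem.Dict (List Char) (List Int))).getD a []) =
      l.filter (fun i => key i == a) := by
  have hm : l.foldl (fun d i => d.modify (key i) [] (· ++ [i]))
        (PySem.Dict.empty : PySem.Dict (List Char) (List Int)) =
      (l.map (fun i => (key i, i))).foldl (fun d p => d.modify p.1 [] (· ++ [p.2]))
        PySem.Dict.empty := by
    rw [List.foldl_map]
  rw [hm, PySem.Dict.getD_foldl_modify_append, PySem.Dict.getD_empty, List.nil_append,
      List.filter_map, List.map_map]
  simp only [Function.comp_def]
  exact List.map_id' _

-- ===== VERDICT (by name: the statement is the Claim_ definition above) =====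
theorem find_primer_binding_spec : Claim_equal_find_primer_binding := by
  intro seq primer mm _
  unfold Spec_find_primer_binding
  by_cases h0 : mm = 0
  · simp only [find_primer_binding, find_primer_binding_alt, find_primer_binding_exact, h0,
      if_true]
    rw [pvIndex_getD _ _ (PySem.Chars.upper primer.toList)]
    exact (pvLoop_filter (PySem.Chars.upper seq.toList) (PySem.Chars.upper primer.toList)
      (fun _ => true)).trans (List.filter_congr fun i _ => Bool.and_true _)
  · simp only [find_primer_binding, find_primer_binding_alt, h0, if_false]
    rw [pvIndex_getD _ _ (PySem.List.slice (PySem.Chars.upper primer.toList) none (some (8 : Int)))]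
    set sU := PySem.Chars.upper seq.toList with hsU
    set pU := PySem.Chars.upper primer.toList with hpU
    set anchor := PySem.List.slice pU none (some (8 : Int)) with hanchor
    set q : Int → Bool := fun i =>
      decide (i + (pU.length : Int) ≤ (sU.length : Int)) &&
        decide (pvMismatch (PySem.List.slice sU (some i) (some (i + (pU.length : Int)))) pU ≤ mm)
      with hqdef
    have hb : (fun (positions : List Int) (i : Int) =>
        if i + (pU.length : Int) ≤ (sU.length : Int) then
          if pvMismatch (PySem.List.slice sU (some i) (some (i + (pU.length : Int)))) pU ≤ mm
          then positions ++ [i] else positions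
        else positions) =
        (fun positions i => if q i then positions ++ [i] else positions) := by
      funext acc i
      by_cases h1 : i + (pU.length : Int) ≤ (sU.length : Int)
      · by_cases h2 : pvMismatch (PySem.List.slice sU (some i) (some (i + (pU.length : Int)))) pU
            ≤ mm <;> simp [hqdef, h1, h2]
      · simp [hqdef, h1]
    rw [hb, PySem.List.foldl_append_if_eq_filter, List.nil_append, List.filter_filter]
    have h := pvLoop_filter sU anchor q
    have hg : (fun pos : Int =>
        if pos + (pU.length : Int) ≤ (sU.length : Int) then
          if pvMismatch (PySem.List.slice sU (some pos) (some (pos + (pU.length : Int)))) pU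
              ≤ mm then [pos]
          else []
        else []) =
        (fun i : Int => if q i then [i] else []) := by
      funext i
      by_cases h1 : i + (pU.length : Int) ≤ (sU.length : Int)
      · by_cases h2 : pvMismatch (PySem.List.slice sU (some i) (some (i + (pU.length : Int)))) pU
            ≤ mm <;> simp [hqdef, h1, h2]
      · simp [hqdef, h1]
    rw [hg, h]
    apply List.filter_congr
    intro i _
    exact Bool.and_comm _ _
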